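-- pv_equiv track=rewrite | github.com/FanchenBao/leetcode | LeetCode_2491.py | dividePlayers
-- ===== SOURCE A (Python) =====
-- from typing import List
--
-- def dividePlayers(skill: List[int]) -> int:
--     """O(NlogN), 1323 ms, faster than 15.38%
--     """
--     skill.sort()
--     res = skill[0] * skill[-1]
--     total_skill = skill[0] + skill[-1]
--     i, j = 1, len(skill) - 2
--     while i < j:
--         if skill[i] + skill[j] != total_skill:
--             return -1
--         res += skill[i] * skill[j]
--         i += 1
--         j -= 1
--     return res
-- ===== SOURCE B (Python) =====
-- from typing import List
--
-- def dividePlayers(skill: List[int]) -> int: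
--     """O(N): no sort. Each value v must pair with target - v where
--     target = 2*sum/N; count values once and accumulate products."""
--     n = len(skill)
--     total2 = 2 * sum(skill)
--     if total2 % n != 0:
--         return -1
--     target = total2 // n
--     cnt = {}
--     for v in skill:
--         cnt[v] = cnt.get(v, 0) + 1
--     res = 0
--     for v, c in cnt.items():
--         if cnt.get(target - v, 0) != c:
--             return -1
--         res += v * (target - v) * c
--     return res // 2
-- ===== Notes on version B (the rewrite author's own statement) =====
-- stated objective: faster
-- what changed: Replaces sort + two-pointer pairing by a single-pass counting dict: target = 2*sum/n, each value v must be matched by equally many (target - v), products accumulated per distinct value and halved.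
-- outside the precondition, e.g. on dividePlayers([1, 2, 3]): A returns 3, B returns 5
import Mathlib
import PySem

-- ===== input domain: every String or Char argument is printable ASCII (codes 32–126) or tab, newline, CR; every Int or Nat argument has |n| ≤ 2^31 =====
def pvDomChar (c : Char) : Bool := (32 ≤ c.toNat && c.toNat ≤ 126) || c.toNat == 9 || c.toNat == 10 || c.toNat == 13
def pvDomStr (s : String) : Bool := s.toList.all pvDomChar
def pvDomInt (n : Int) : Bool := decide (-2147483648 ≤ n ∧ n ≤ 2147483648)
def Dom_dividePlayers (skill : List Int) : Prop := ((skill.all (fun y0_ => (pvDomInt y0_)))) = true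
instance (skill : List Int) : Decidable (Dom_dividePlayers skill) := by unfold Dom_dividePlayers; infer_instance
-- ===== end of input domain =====

-- B replaces A's sort + two-pointer pairing by a one-pass counting dict (target = 2*sum/n); equivalence is
-- about the RETURN value only: A sorts its argument in place, B does not mutate it.

-- ===== PORT A =====
-- the 'while i < j' loop of A; the '_, _ => 0' branch is unreachable (1 ≤ i < j ≤ len-2 stays in range)
def dividePlayersLoop (s : List Int) (t : Int) (i j res : Int) : Int :=
  if _h : i < j then
    match PySem.List.pyGet? s i, PySem.List.pyGet? s j with
    | some a, some b =>
      if a + b ≠ t then -1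
      else dividePlayersLoop s t (i + 1) (j - 1) (res + a * b)
    | _, _ => 0
  else res
termination_by (j - i).toNat
decreasing_by omega

def dividePlayers (skill : List Int) : Int :=
  let s := PySem.List.sorted skill (fun x => x) false
  match PySem.List.pyGet? s 0, PySem.List.pyGet? s (-1) with
  | some first, some last =>
    let res := first * last
    let total_skill := first + last
    dividePlayersLoop s total_skill 1 ((s.length : Int) - 2) res
  | _, _ => 0   -- Python raises IndexError here (empty list); excluded by Pre_

-- ===== PORT B =====
-- the 'for v, c in cnt.items()' loop of Source B; none = the early 'return -1'
def altPairLoop (cnt : PySem.Dict Int Int) (target : Int) : List (Int × Int) → Int → Option Int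
  | [], res => some res
  | (v, c) :: rest, res =>
    if cnt.getD (target - v) 0 ≠ c then none
    else altPairLoop cnt target rest (res + v * (target - v) * c)

def dividePlayers_alt (skill : List Int) : Int :=
  let n : Int := skill.length
  let total2 := 2 * skill.sum
  match PySem.Int.mod? total2 n with
  | none => 0   -- Python raises ZeroDivisionError here (empty list); excluded by Pre_
  | some r =>
    if r ≠ 0 then -1
    else
      let target := PySem.Int.floordiv total2 n
      let cnt := skill.foldl (fun d v => d.insert v (d.getD v 0 + 1)) PySem.Dict.empty
      match altPairLoop cnt target cnt.items 0 with
      | some res => PySem.Int.floordiv res 2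
      | none => -1

-- ===== PRECONDITION & SPEC =====
-- Pre_ excludes the empty list (A raises IndexError, B ZeroDivisionError) and odd-length lists, which
-- cannot be divided into teams of 2 at all, so no return value is specified for them (A happens to pair
-- around the ignored middle of the sorted list, B pairs each value with target-v counting it twice).
def Pre_dividePlayers (skill : List Int) : Prop := skill ≠ [] ∧ skill.length % 2 = 0
instance (skill : List Int) : Decidable (Pre_dividePlayers skill) := by unfold Pre_dividePlayers; infer_instance
def pvWitness_dividePlayers : List Int := [3, 1, 2, 2]
def Spec_dividePlayers (skill : List Int) (out : Int) : Prop := out = dividePlayers_alt skill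
instance (skill : List Int) (out : Int) : Decidable (Spec_dividePlayers skill out) := by unfold Spec_dividePlayers; infer_instance

-- ===== CLAIM (what is proved, stated in full; the proofs are below) =====
def Claim_equal_dividePlayers : Prop := ∀ (skill : List Int), Dom_dividePlayers skill → Pre_dividePlayers skill → Spec_dividePlayers skill (dividePlayers skill)

-- ===== LEMMAS AND PROOFS =====

-- clean both-ends peeling of A's two-pointer loop, over the list itself
def peel (t : Int) (u : List Int) (res : Int) : Option Int :=
  match u with
  | [] => some res
  | [_] => some res
  | a :: b :: rest =>
    let last := (b :: rest).getLast (by simp)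
    if a + last ≠ t then none
    else peel t (b :: rest).dropLast (res + a * last)
termination_by u.length
decreasing_by simp

lemma peel_step (t a b : Int) (l : List Int) (res : Int) :
    peel t (a :: (l ++ [b])) res = if a + b ≠ t then none else peel t l (res + a * b) := by
  match l with
  | [] => simp [peel]
  | c :: l' =>
    have h1 : (c :: (l' ++ [b])).getLast (by simp) = b := by
      simp
    have h2 : (c :: (l' ++ [b])).dropLast = c :: l' := by
      rw [show c :: (l' ++ [b]) = (c :: l') ++ [b] by simp]
      exact List.dropLast_concat
    simp only [List.cons_append, peel, h1, h2]

-- the symmetric-list invariant: pairing succeeds iff mapping x ↦ t - x reverses the list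
lemma sym_decomp (t a b : Int) (l : List Int) :
    ((a :: (l ++ [b])).map (fun x => t - x) = (a :: (l ++ [b])).reverse) ↔
      (a + b = t ∧ l.map (fun x => t - x) = l.reverse) := by
  have lhs : (a :: (l ++ [b])).map (fun x => t - x) = (t - a) :: (l.map (fun x => t - x) ++ [t - b]) := by
    simp
  have rhs : (a :: (l ++ [b])).reverse = b :: (l.reverse ++ [a]) := by simp
  rw [lhs, rhs, List.cons.injEq]
  constructor
  · rintro ⟨h1, h2⟩
    have h3 := List.append_inj h2 (by simp)
    exact ⟨by omega, h3.1⟩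
  · rintro ⟨h1, h2⟩
    refine ⟨by omega, ?_⟩
    rw [h2]
    have : t - b = a := by omega
    rw [this]

lemma peel_spec (N : Nat) : ∀ (u : List Int), u.length ≤ N → 2 ∣ u.length → ∀ (t res : Int),
    (u.map (fun x => t - x) = u.reverse →
      peel t u res = some (res + (u.map (fun x => x * (t - x))).sum / 2) ∧
      2 ∣ (u.map (fun x => x * (t - x))).sum) ∧
    (u.map (fun x => t - x) ≠ u.reverse → peel t u res = none) := by
  induction N with
  | zero =>
    intro u hu _ t res
    have : u = [] := List.eq_nil_of_length_eq_zero (by omega)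
    subst this
    simp [peel]
  | succ N ih =>
    intro u hu hev t res
    match u with
    | [] => simp [peel]
    | [x] => simp at hev
    | a :: x :: rest =>
      -- decompose the tail as l ++ [b]
      obtain ⟨l, b, hlb⟩ : ∃ l b, x :: rest = l ++ [b] := by
        refine ⟨(x :: rest).dropLast, (x :: rest).getLast (by simp), ?_⟩
        exact (List.dropLast_concat_getLast (by simp)).symm
      rw [show a :: x :: rest = a :: (x :: rest) from rfl, hlb]
      rw [peel_step]
      have hrl : rest.length = l.length := by
        have := congrArg List.length hlb
        simp at this; omega
      simp only [List.length_cons] at hu hev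
      have hlN : l.length ≤ N := by omega
      have hlev : 2 ∣ l.length := by omega
      have IH := ih l hlN hlev t (res + a * b)
      constructor
      · intro hsym
        rw [sym_decomp] at hsym
        obtain ⟨hab, hsl⟩ := hsym
        have IH1 := (IH.1 hsl)
        rw [if_neg (by omega)]
        have hsum : ((a :: (l ++ [b])).map (fun x => x * (t - x))).sum
            = 2 * (a * b) + (l.map (fun x => x * (t - x))).sum := by
          simp [List.sum_append]
          have h1 : t - a = b := by omega
          have h2 : t - b = a := by omega
          rw [h1, h2]; ring
        rw [hsum]
        refine ⟨?_, by omega⟩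
        rw [IH1.1]
        congr 1
        obtain ⟨e, he⟩ := IH1.2
        rw [he]
        omega
      · intro hsym
        simp only [ne_eq, sym_decomp] at hsym
        by_cases hab : a + b = t
        · rw [if_neg (by omega)]
          exact IH.2 (by tauto)
        · rw [if_pos (by omega)]

-- A's index loop is peel on the slice s[i..j]
lemma slice_decomp (s : List Int) (p q : Nat) (hpq : p < q) (hq : q < s.length) :
    (s.drop p).take (q + 1 - p) =
      s[p] :: ((s.drop (p + 1)).take (q - p - 1) ++ [s[q]]) := by
  have h1 : s.drop p = s[p] :: s.drop (p + 1) := List.drop_eq_getElem_cons (by omega)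
  rw [h1, show q + 1 - p = (q - p - 1) + 1 + 1 from by omega, List.take_succ_cons]
  congr 1
  rw [List.take_add_one]
  congr 1
  have hlt : q - p - 1 < (s.drop (p + 1)).length := by simp; omega
  rw [List.getElem?_eq_getElem hlt]
  simp [List.getElem_drop]
  congr 1
  omega

lemma loop_eq_peel (s : List Int) (t : Int) : ∀ (d : Nat) (i j : Int) (res : Int), (j - i).toNat ≤ d →
    0 ≤ i → j < (s.length : Int) →
    dividePlayersLoop s t i j res =
      match peel t ((s.drop i.toNat).take (j + 1 - i).toNat) res with
      | some r => r
      | none => -1 := by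
  intro d
  induction d with
  | zero =>
    intro i j res hd hi hj
    have hij : ¬ i < j := by omega
    rw [dividePlayersLoop, dif_neg hij]
    have : (j + 1 - i).toNat ≤ 1 := by omega
    match hu : (s.drop i.toNat).take (j + 1 - i).toNat with
    | [] => simp [peel]
    | [x] => simp [peel]
    | x :: y :: r =>
      exfalso
      have := congrArg List.length hu
      simp at this
      omega
  | succ d ih =>
    intro i j res hd hi hj
    by_cases hij : i < j
    · obtain ⟨p, rfl⟩ : ∃ p : Nat, i = (p : Int) := ⟨i.toNat, by omega⟩
      obtain ⟨q, rfl⟩ : ∃ q : Nat, j = (q : Int) := ⟨j.toNat, by omega⟩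
      have hp : p < q := by omega
      have hq : q < s.length := by omega
      have hgi : PySem.List.pyGet? s (p : Int) = some s[p] := PySem.List.pyGet?_ofNat s p (by omega)
      have hgj : PySem.List.pyGet? s (q : Int) = some s[q] := PySem.List.pyGet?_ofNat s q hq
      have hdec : (s.drop (p : Int).toNat).take ((q : Int) + 1 - (p : Int)).toNat =
          s[p] :: ((s.drop ((p : Int) + 1).toNat).take (((q : Int) - 1) + 1 - ((p : Int) + 1)).toNat ++ [s[q]]) := by
        have hsd := slice_decomp s p q hp hq
        rw [show ((q : Int) + 1 - (p : Int)).toNat = q + 1 - p from by omega, Int.toNat_natCast, hsd]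
        congr 3
        all_goals omega
      rw [dividePlayersLoop, dif_pos hij, hgi, hgj, hdec, peel_step]
      by_cases hab : s[p] + s[q] ≠ t
      · simp [hab]
      · have hab' : s[p] + s[q] = t := not_not.mp hab
        have hih := ih ((p : Int) + 1) ((q : Int) - 1) (res + s[p] * s[q]) (by omega) (by omega) (by omega)
        simp only [hab']
        simpa using hih
    · rw [dividePlayersLoop, dif_neg hij]
      have : (j + 1 - i).toNat ≤ 1 := by omega
      match hu : (s.drop i.toNat).take (j + 1 - i).toNat with
      | [] => simp [peel]
      | [x] => simp [peel]
      | x :: y :: r =>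
        exfalso
        have := congrArg List.length hu
        simp at this
        omega

lemma pyGet_neg_one (l : List Int) (h : l ≠ []) :
    PySem.List.pyGet? l (-1) = some (l.getLast h) := by
  have h1 : 1 ≤ l.length := List.length_pos_iff.mpr h
  simp [PySem.List.pyGet?, PySem.List.pyIdx?, h1, List.getLast_eq_getElem]

lemma dividePlayers_eq_peel (skill : List Int) (h : skill ≠ []) (h2 : skill.length % 2 = 0) :
    dividePlayers skill =
      match peel ((PySem.List.sorted skill (fun x => x) false).head (by simp [PySem.List.sorted_eq_nil_iff, h]) +
                  (PySem.List.sorted skill (fun x => x) false).getLast (by simp [PySem.List.sorted_eq_nil_iff, h]))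
              (PySem.List.sorted skill (fun x => x) false) 0 with
      | some r => r
      | none => -1 := by
  set s := PySem.List.sorted skill (fun x => x) false with hsdef
  have hsne : s ≠ [] := by simp [hsdef, PySem.List.sorted_eq_nil_iff, h]
  have hlen : s.length = skill.length := (PySem.List.sorted_perm skill _ false).length_eq
  have hn1 : 1 ≤ s.length := List.length_pos_iff.mpr hsne
  have hn2 : 2 ≤ s.length := by omega
  have htne : s.tail ≠ [] := by
    intro hc; have := congrArg List.length hc; simp at this; omega
  set t := s.head hsne + s.getLast hsne with htdef
  have hg0 : PySem.List.pyGet? s 0 = some (s.head hsne) := by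
    have h0 := PySem.List.pyGet?_ofNat s 0 (by omega)
    rw [List.head_eq_getElem]
    simpa using h0
  have hgm1 : PySem.List.pyGet? s (-1) = some (s.getLast hsne) := pyGet_neg_one s hsne
  have hdecomp : s = s.head hsne :: (s.tail.dropLast ++ [s.getLast hsne]) := by
    conv_lhs => rw [← List.cons_head_tail hsne]
    congr 1
    rw [← List.getLast_tail (l := s) htne]
    exact (List.dropLast_concat_getLast htne).symm
  have hslice : (s.drop (1 : Int).toNat).take (((s.length : Int) - 2) + 1 - 1).toNat
      = s.tail.dropLast := by
    rw [show ((1 : Int)).toNat = 1 from rfl, List.drop_one,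
      show (((s.length : Int) - 2) + 1 - 1).toNat = s.tail.length - 1 from by simp; omega,
      ← List.dropLast_eq_take]
  rw [show dividePlayers skill
      = dividePlayersLoop s t 1 ((s.length : Int) - 2) (s.head hsne * s.getLast hsne) from by
    rw [dividePlayers, ← hsdef, hg0, hgm1]]
  rw [loop_eq_peel s t ((s.length : Int) - 2 - 1).toNat 1 ((s.length : Int) - 2)
    (s.head hsne * s.getLast hsne) (by omega) (by omega) (by omega)]
  rw [hslice]
  conv_rhs => rw [← hsdef, hdecomp, peel_step, if_neg (by omega), zero_add]


-- B's items loop characterized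
lemma altPairLoop_spec (cnt : PySem.Dict Int Int) (c : Int) : ∀ (items : List (Int × Int)) (res : Int),
    altPairLoop cnt c items res =
      if ∀ p ∈ items, cnt.getD (c - p.1) 0 = p.2 then
        some (res + (items.map (fun p => p.1 * (c - p.1) * p.2)).sum)
      else none := by
  intro items
  induction items with
  | nil => intro res; simp [altPairLoop]
  | cons p rest ih =>
    intro res
    obtain ⟨v, k⟩ := p
    by_cases h : cnt.getD (c - v) 0 = k
    · rw [show altPairLoop cnt c ((v, k) :: rest) res
          = altPairLoop cnt c rest (res + v * (c - v) * k) from by simp [altPairLoop, h], ih]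
      by_cases h2 : ∀ p ∈ rest, cnt.getD (c - p.1) 0 = p.2
      · rw [if_pos h2, if_pos (by simpa [h] using h2)]
        simp; ring
      · rw [if_neg h2, if_neg (by intro hc; exact h2 (fun p hp => hc p (by simp [hp])))]
    · rw [show altPairLoop cnt c ((v, k) :: rest) res = none from by simp [altPairLoop, h]]
      rw [if_neg (by intro hc; exact h (hc (v, k) (by simp)))]

-- sum over the counter's items equals the sum over the list
lemma sum_items (l : List Int) (g : Int → Int) :
    (((PySem.Set.ofList l).map (fun v => g v * (l.count v : Int))).sum) = (l.map g).sum := by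
  have hnd := PySem.Set.nodup_ofList l
  have h1 : (((PySem.Set.ofList l).map (fun v => g v * (l.count v : Int))).sum)
      = (PySem.Set.ofList l).toFinset.sum (fun v => g v * (l.count v : Int)) :=
    (List.sum_toFinset _ hnd).symm
  have h2 : (PySem.Set.ofList l).toFinset = l.toFinset := by
    ext x; simp [PySem.Set.mem_ofList]
  have h3 : (l.map g).sum = ((l : Multiset Int).map g).sum := by simp
  rw [h1, h2, h3, Finset.sum_multiset_map_count]
  have h4 : (l : Multiset Int).toFinset = l.toFinset := rfl
  rw [h4]
  apply Finset.sum_congr rfl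
  intro x _
  have : Multiset.count x (l : Multiset Int) = l.count x := by simp
  rw [this, nsmul_eq_mul]
  ring

-- B in closed form
lemma alt_eq (skill : List Int) (h : skill ≠ []) :
    dividePlayers_alt skill =
      if ((skill.length : Int)) ∣ (2 * skill.sum) then
        (if ∀ v ∈ skill, skill.count (PySem.Int.floordiv (2 * skill.sum) (skill.length : Int) - v) = skill.count v then
          (skill.map (fun x => x * (PySem.Int.floordiv (2 * skill.sum) (skill.length : Int) - x))).sum / 2
        else -1)
      else -1 := by
  have hn : ((skill.length : Int)) ≠ 0 := by
    have := List.length_pos_iff.mpr h; omega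
  set c := PySem.Int.floordiv (2 * skill.sum) (skill.length : Int) with hc
  have hmod : PySem.Int.mod? (2 * skill.sum) ((skill.length : Int)) =
      some (PySem.Int.mod (2 * skill.sum) ((skill.length : Int))) := by
    simp [PySem.Int.mod?, PySem.Int.mod, h]
  rw [dividePlayers_alt]
  simp only [hmod, PySem.Dict.foldl_insert_getD_add_one_eq_counter]
  rw [altPairLoop_spec, PySem.Dict.items_counter]
  by_cases hdvd : ((skill.length : Int)) ∣ (2 * skill.sum)
  · rw [if_pos hdvd]
    have hz : PySem.Int.mod (2 * skill.sum) ((skill.length : Int)) = 0 :=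
      (PySem.Int.mod_eq_zero_iff_dvd _ _).mpr hdvd
    rw [hz]
    simp only [ne_eq, not_true_eq_false, if_false]
    have hcond : (∀ p ∈ (PySem.Set.ofList skill).map (fun k => (k, (skill.count k : Int))),
        (PySem.Dict.counter skill).getD (c - p.1) 0 = p.2) ↔
        (∀ v ∈ skill, skill.count (c - v) = skill.count v) := by
      constructor
      · intro hp v hv
        have := hp (v, (skill.count v : Int)) (by
          simp only [List.mem_map]
          exact ⟨v, (PySem.Set.mem_ofList skill v).mpr hv, rfl⟩)
        rw [PySem.Dict.getD_counter] at this
        simp only at this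
        exact_mod_cast this
      · intro hp p hmem
        simp only [List.mem_map] at hmem
        obtain ⟨v, hv, rfl⟩ := hmem
        rw [PySem.Dict.getD_counter]
        simp only
        exact_mod_cast hp v ((PySem.Set.mem_ofList skill v).mp hv)
    by_cases hcs : ∀ v ∈ skill, skill.count (c - v) = skill.count v
    · rw [if_pos (hcond.mpr hcs), if_pos hcs]
      simp only [zero_add]
      have hsum : (((PySem.Set.ofList skill).map (fun k => (k, (skill.count k : Int)))).map
            (fun p => p.1 * (c - p.1) * p.2)).sum
          = (skill.map (fun x => x * (c - x))).sum := by
        rw [List.map_map]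
        have : ((fun p : Int × Int => p.1 * (c - p.1) * p.2) ∘ fun k => (k, (skill.count k : Int)))
            = fun v => (v * (c - v)) * (skill.count v : Int) := by
          funext v; simp
        rw [this, sum_items skill (fun v => v * (c - v))]
      rw [hsum]
      exact PySem.Int.floordiv_eq_ediv_of_pos (by norm_num)
    · rw [if_neg (fun hcc => hcs (hcond.mp hcc)), if_neg hcs]
  · rw [if_neg hdvd]
    have hz : ¬ PySem.Int.mod (2 * skill.sum) ((skill.length : Int)) = 0 := by
      rw [PySem.Int.mod_eq_zero_iff_dvd]; exact hdvd
    simp [hz]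

-- count symmetry on members extends to all integers
lemma countSym_all (skill : List Int) (c : Int)
    (h : ∀ v ∈ skill, skill.count (c - v) = skill.count v) :
    ∀ v : Int, skill.count (c - v) = skill.count v := by
  intro v
  by_cases hv : v ∈ skill
  · exact h v hv
  · by_cases hw : (c - v) ∈ skill
    · have := h (c - v) hw
      rw [show c - (c - v) = v from by ring] at this
      omega
    · rw [List.count_eq_zero.mpr hv, List.count_eq_zero.mpr hw]

-- count symmetry forces the sorted list to be reversed by x ↦ c - x
lemma countSym_sym (skill : List Int) (c : Int)
    (h : ∀ v : Int, skill.count (c - v) = skill.count v) :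
    (PySem.List.sorted skill (fun x => x) false).map (fun x => c - x) =
      (PySem.List.sorted skill (fun x => x) false).reverse := by
  set s := PySem.List.sorted skill (fun x => x) false with hs
  have hperm : s.Perm skill := PySem.List.sorted_perm skill (fun x => x) false
  have hsorted : s.Pairwise (fun a b : Int => a ≤ b) := by
    simpa using PySem.List.sorted_pairwise skill (fun x => x)
  have hinj : Function.Injective (fun x : Int => c - x) := by
    intro a b hab; simp at hab; omega
  -- (s.map (c - ·)).reverse is a permutation of s
  have hp : ((s.map (fun x => c - x)).reverse).Perm s := by
    rw [List.perm_iff_count]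
    intro a
    rw [List.count_reverse]
    have h1 := List.count_map_of_injective s (fun x => c - x) hinj (c - a)
    simp only [show c - (c - a) = a from by ring] at h1
    rw [h1]
    calc s.count (c - a) = skill.count (c - a) := hperm.count_eq _
      _ = skill.count a := h a
      _ = s.count a := (hperm.count_eq _).symm
  -- it is sorted as well
  have hsorted2 : ((s.map (fun x => c - x)).reverse).Pairwise (fun a b : Int => a ≤ b) := by
    rw [List.pairwise_reverse]
    exact List.Pairwise.map _ (fun a b hab => by omega) hsorted
  have := List.Perm.eq_of_pairwise (le := fun a b : Int => a ≤ b)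
    (fun a b _ _ h1 h2 => by omega) hsorted2 hsorted hp
  have h3 := congrArg List.reverse this
  simpa using h3

-- the reversal property yields the total sum and count symmetry
lemma sum_map_sub (s : List Int) (t : Int) :
    (s.map (fun x => t - x)).sum = s.length * t - s.sum := by
  induction s with
  | nil => simp
  | cons a s ih => simp [ih]; ring

lemma sym_total (s : List Int) (t : Int) (h : s.map (fun x => t - x) = s.reverse) :
    2 * s.sum = (s.length : Int) * t := by
  have := congrArg List.sum h
  rw [sum_map_sub, List.sum_reverse] at this
  omega


-- ===== VERDICT (by name: the statement is the Claim_ definition above) =====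
theorem dividePlayers_spec : Claim_equal_dividePlayers := by
  intro skill _ hpre
  obtain ⟨h, h2⟩ := hpre
  unfold Spec_dividePlayers
  rw [dividePlayers_eq_peel skill h h2, alt_eq skill h]
  set s := PySem.List.sorted skill (fun x => x) false with hsdef
  have hsne : s ≠ [] := by simp [hsdef, PySem.List.sorted_eq_nil_iff, h]
  have hperm : s.Perm skill := PySem.List.sorted_perm skill _ false
  have hlen : s.length = skill.length := hperm.length_eq
  have hn1 : 1 ≤ s.length := List.length_pos_iff.mpr hsne
  set t := s.head hsne + s.getLast hsne with htdef
  have hev2 : 2 ∣ s.length := by omega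
  have hczero : ((skill.length : Int)) ≠ 0 := by
    have : 0 < skill.length := by omega
    omega
  set c := PySem.Int.floordiv (2 * skill.sum) ((skill.length : Int)) with hc
  by_cases hsym : s.map (fun x => t - x) = s.reverse
  · have hps := (peel_spec s.length s le_rfl hev2 t 0).1 hsym
    rw [hps.1]
    simp only [zero_add]
    have htot : 2 * skill.sum = ((skill.length : Int)) * t := by
      rw [← hperm.sum_eq, ← hlen]
      exact sym_total s t hsym
    have hdvd : ((skill.length : Int)) ∣ 2 * skill.sum := ⟨t, htot⟩
    have hct : c = t := by
      rw [hc, htot, PySem.Int.floordiv_eq_ediv_of_pos (by omega),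
        Int.mul_ediv_cancel_left _ hczero]
    rw [if_pos hdvd, hct]
    have hinj : Function.Injective (fun x : Int => t - x) := fun a b hab => by
      simp at hab; omega
    have hcs : ∀ v ∈ skill, skill.count (t - v) = skill.count v := by
      intro v _
      have h1 := List.count_map_of_injective s (fun x => t - x) hinj v
      rw [hsym, List.count_reverse] at h1
      calc skill.count (t - v) = s.count (t - v) := (hperm.count_eq _).symm
        _ = s.count v := h1
        _ = skill.count v := hperm.count_eq _
    rw [if_pos hcs]
    have hsum : (s.map (fun x => x * (t - x))).sum = (skill.map (fun x => x * (t - x))).sum :=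
      (hperm.map _).sum_eq
    rw [hsum]
  · have hps := (peel_spec s.length s le_rfl hev2 t 0).2 hsym
    rw [hps]
    by_cases hdvd : ((skill.length : Int)) ∣ 2 * skill.sum
    · rw [if_pos hdvd]
      by_cases hcs : ∀ v ∈ skill, skill.count (c - v) = skill.count v
      · exfalso
        have hmap := countSym_sym skill c (countSym_all skill c hcs)
        rw [← hsdef] at hmap
        have hh := congrArg List.head? hmap
        rw [List.head?_map, List.head?_reverse, List.head?_eq_some_head hsne,
          List.getLast?_eq_some_getLast hsne, Option.map_some] at hh
        have hct : t = c := by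
          have : c - s.head hsne = s.getLast hsne := by exact_mod_cast Option.some.inj hh
          omega
        exact hsym (by rw [hct]; exact hmap)
      · rw [if_neg hcs]
    · rw [if_neg hdvd]
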